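-- pv_equiv track=rewrite | github.com/Eapl1008/monthly-sales-analyzer-project | monthly_sales_analyzer.py | top_product
-- ===== SOURCE A (Python) =====
-- def top_product(data):
--     """Determines which product had the highest total sales in 30 days."""
--     maximo_producto_vendidos = {}
--     for ventas in data:
--         for producto, cantidad in ventas.items():
--             if producto != 'day':
--                 maximo_producto_vendidos[producto] = maximo_producto_vendidos.get(producto, 0) + cantidad
--     max_producto = max(maximo_producto_vendidos, key = maximo_producto_vendidos.get)
--     return max_producto
-- ===== SOURCE B (Python) =====
-- def top_product(data):
--     """Determines which product had the highest total sales in 30 days."""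
--     products = list(dict.fromkeys(p for ventas in data for p in ventas if p != 'day'))
--     return max(products, key=lambda p: sum(ventas.get(p, 0) for ventas in data))
-- ===== Notes on version B (the rewrite author's own statement) =====
-- stated objective: alternative
-- what changed: A builds one running totals dict in a single accumulation pass and takes max over it; B first collects the distinct product names in first-appearance order (dict.fromkeys over a flattened comprehension) and then, per product, re-scans all daily dicts summing its quantity inside the max key function; Pre_ excludes only inputs with no non-'day' entry, where both A and B raise ValueError.
import Mathlib
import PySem

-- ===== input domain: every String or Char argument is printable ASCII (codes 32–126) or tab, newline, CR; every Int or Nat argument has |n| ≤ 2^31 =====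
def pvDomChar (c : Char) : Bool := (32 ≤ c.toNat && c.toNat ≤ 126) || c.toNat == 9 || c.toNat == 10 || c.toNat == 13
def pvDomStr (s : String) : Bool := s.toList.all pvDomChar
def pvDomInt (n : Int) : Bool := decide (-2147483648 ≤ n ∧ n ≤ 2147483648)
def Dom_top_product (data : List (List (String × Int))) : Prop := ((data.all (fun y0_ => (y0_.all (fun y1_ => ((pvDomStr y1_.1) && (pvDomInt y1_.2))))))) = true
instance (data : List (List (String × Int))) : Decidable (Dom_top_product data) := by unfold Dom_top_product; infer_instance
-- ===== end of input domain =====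

-- B re-decomposes A: it first collects the distinct product names in first-appearance order, then
-- re-scans all daily dicts per product inside the max key function; same return value, no mutation.

-- ===== PORT A =====
-- each element of `data` is a Python dict: its assoc list is read through PySem.Dict.ofList
def top_product (data : List (List (String × Int))) : String :=
  let d : PySem.Dict String Int := data.foldl (fun acc ventas =>
      ((PySem.Dict.ofList ventas).items).foldl
        (fun acc p => if p.1 ≠ "day" then acc.modify p.1 0 (· + p.2) else acc) acc)
    PySem.Dict.empty
  -- max(maximo_producto_vendidos, key=….get): every iterated key is present in the dict, so .get k is
  -- exactly getD k 0 here; max? = none exactly when the dict is empty, where Python raises ValueError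
  -- (those inputs are excluded by Pre_)
  (PySem.List.max? d.keys (fun k => d.getD k 0)).getD ""

-- ===== PORT B =====
def top_product_alt (data : List (List (String × Int))) : String :=
  let products : List String := PySem.List.dedup
    (data.flatMap (fun ventas => ((PySem.Dict.ofList ventas).keys).filter (fun p => p ≠ "day")))
  -- max(products, key=…): max? = none exactly when products = [], where Python raises ValueError
  -- (those inputs are excluded by Pre_)
  (PySem.List.max? products
    (fun p => data.foldl (fun s ventas => s + (PySem.Dict.ofList ventas).getD p 0) 0)).getD ""

-- ===== PRECONDITION & SPEC =====
-- Pre_ excludes exactly the inputs with no non-'day' entry, where BOTH Pythons raise ValueError (max of an empty collection).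
def Pre_top_product (data : List (List (String × Int))) : Prop :=
  ∃ ventas ∈ data, ∃ p ∈ ventas, p.1 ≠ "day"
instance (data : List (List (String × Int))) : Decidable (Pre_top_product data) := by unfold Pre_top_product; infer_instance

def pvWitness_top_product : (List (List (String × Int))) := [[("a", 3), ("day", 1)], [("a", 2), ("b", 4)]]

def Spec_top_product (data : List (List (String × Int))) (out : String) : Prop := out = top_product_alt data
instance (data : List (List (String × Int))) (out : String) : Decidable (Spec_top_product data out) := by unfold Spec_top_product; infer_instance

-- ===== CLAIM (what is proved, stated in full; the proofs are below) =====
def Claim_equal_top_product : Prop := ∀ (data : List (List (String × Int))), Dom_top_product data → Pre_top_product data → Spec_top_product data (top_product data)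

-- ===== LEMMAS AND PROOFS =====

theorem pv_filter_eq_nil {p : String} (l : List (String × Int)) (h : p ∉ l.map (·.1)) :
    l.filter (fun q => q.1 == p) = [] := by
  rw [List.filter_eq_nil_iff]
  intro a ha
  simp only [beq_iff_eq]
  intro hap
  exact h (List.mem_map.mpr ⟨a, ha, hap⟩)

theorem pv_sum_match (l : List (String × Int)) (hnd : (l.map (·.1)).Nodup) (p : String) :
    (((PySem.Dict.mk l).items.filter (fun q => q.1 == p)).map (·.2)).sum
      = (PySem.Dict.mk l).getD p 0 := by
  induction l with
  | nil => simp [PySem.Dict.getD, PySem.Dict.get?]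
  | cons h t ih =>
    obtain ⟨k, v⟩ := h
    simp only [List.map_cons, List.nodup_cons] at hnd
    by_cases hk : k = p
    · subst hk
      rw [show (PySem.Dict.mk ((k, v) :: t)).items = (k, v) :: t from rfl]
      rw [List.filter_cons_of_pos (by simp)]
      rw [pv_filter_eq_nil t hnd.1]
      simp [PySem.Dict.getD, PySem.Dict.get?_mk_cons]
    · rw [show (PySem.Dict.mk ((k, v) :: t)).items = (k, v) :: t from rfl]
      rw [List.filter_cons_of_neg (by simp [hk])]
      rw [ih hnd.2]
      simp [PySem.Dict.getD, PySem.Dict.get?_mk_cons, hk]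

def pvStep {α κ : Type} [LT κ] [DecidableLT κ] (f : α → κ) (acc : Option α) (x : α) : Option α :=
  match acc with
  | none => some x
  | some m => if f m < f x then some x else some m

theorem pv_max?_eq_foldl {α κ : Type} [LT κ] [DecidableLT κ] (xs : List α) (f : α → κ) :
    PySem.List.max? xs f = xs.foldl (pvStep f) none := rfl

theorem pv_max?_congr_aux {α κ : Type} [LT κ] [DecidableLT κ] (xs : List α) (f g : α → κ)
    (acc : Option α) (h : ∀ x ∈ xs, f x = g x) (hacc : ∀ m, acc = some m → f m = g m) :
    xs.foldl (pvStep f) acc = xs.foldl (pvStep g) acc := by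
  induction xs generalizing acc with
  | nil => rfl
  | cons y t ih =>
    have hy : f y = g y := h y (by simp)
    have ht : ∀ x ∈ t, f x = g x := fun x hx => h x (List.mem_cons_of_mem _ hx)
    rw [List.foldl_cons, List.foldl_cons]
    cases acc with
    | none =>
      show List.foldl (pvStep f) (some y) t = List.foldl (pvStep g) (some y) t
      exact ih _ ht (fun m hm => by
        simp only [Option.some.injEq] at hm; exact hm ▸ hy)
    | some m' =>
      have hm' : f m' = g m' := hacc m' rfl
      show List.foldl (pvStep f) (if f m' < f y then some y else some m') t
         = List.foldl (pvStep g) (if g m' < g y then some y else some m') t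
      rw [hm', hy]
      by_cases hlt : g m' < g y
      · rw [if_pos hlt]
        exact ih _ ht (fun m hm => by
          simp only [Option.some.injEq] at hm; exact hm ▸ hy)
      · rw [if_neg hlt]
        exact ih _ ht (fun m hm => by
          simp only [Option.some.injEq] at hm; exact hm ▸ hm')

theorem pv_max?_congr {α κ : Type} [LT κ] [DecidableLT κ] (xs : List α) (f g : α → κ)
    (h : ∀ x ∈ xs, f x = g x) : PySem.List.max? xs f = PySem.List.max? xs g := by
  rw [pv_max?_eq_foldl, pv_max?_eq_foldl]
  exact pv_max?_congr_aux xs f g none h (by simp)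

theorem pv_foldl_if_filter (l : List (String × Int)) (d : PySem.Dict String Int) :
    l.foldl (fun acc p => if p.1 ≠ "day" then acc.modify p.1 0 (· + p.2) else acc) d
      = (l.filter (fun p => p.1 ≠ "day")).foldl (fun acc p => acc.modify p.1 0 (· + p.2)) d := by
  induction l generalizing d with
  | nil => rfl
  | cons h t ih =>
    by_cases hh : h.1 = "day"
    · simpa [hh] using ih d
    · simpa [hh] using ih (d.modify h.1 0 (· + h.2))

theorem pv_getD_fold_modify (l : List (String × Int)) (d : PySem.Dict String Int) (k : String) :
    (l.foldl (fun acc p => acc.modify p.1 0 (· + p.2)) d).getD k 0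
      = d.getD k 0 + ((l.filter (fun q => q.1 == k)).map (·.2)).sum := by
  induction l generalizing d with
  | nil => simp
  | cons h t ih =>
    by_cases hk : h.1 = k
    · subst hk
      rw [List.foldl_cons, ih, List.filter_cons_of_pos (by simp)]
      rw [PySem.Dict.getD_modify]
      simp [add_assoc, add_comm]
      ring
    · rw [List.foldl_cons, ih, List.filter_cons_of_neg (by simp [hk])]
      rw [PySem.Dict.getD_modify, if_neg (fun h' => hk h'.symm)]

theorem pv_row_keys (v : List (String × Int)) :
    ((PySem.Dict.ofList v).items.filter (fun p => p.1 ≠ "day")).map (·.1)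
      = ((PySem.Dict.ofList v).keys).filter (fun p => p ≠ "day") := by
  rw [show (PySem.Dict.ofList v).keys = (PySem.Dict.ofList v).items.map (·.1) from rfl]
  rw [List.filter_map]
  rfl

theorem pv_row_filter (v : List (String × Int)) (p : String) (hp : p ≠ "day") :
    ((PySem.Dict.ofList v).items.filter (fun q => q.1 ≠ "day")).filter (fun q => q.1 == p)
      = (PySem.Dict.ofList v).items.filter (fun q => q.1 == p) := by
  rw [List.filter_filter]
  apply List.filter_congr
  intro a _
  by_cases h : a.1 = p <;> simp [h, hp]

theorem pv_row_sum (v : List (String × Int)) (p : String) :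
    (((PySem.Dict.ofList v).items.filter (fun q => q.1 == p)).map (·.2)).sum
      = (PySem.Dict.ofList v).getD p 0 := by
  exact pv_sum_match (PySem.Dict.ofList v).items (PySem.Dict.nodup_keys_ofList v) p

theorem top_product_eq' (data : List (List (String × Int))) :
    (let d : PySem.Dict String Int := data.foldl (fun acc ventas =>
        ((PySem.Dict.ofList ventas).items).foldl
          (fun acc p => if p.1 ≠ "day" then acc.modify p.1 0 (· + p.2) else acc) acc)
      PySem.Dict.empty
     (PySem.List.max? d.keys (fun k => d.getD k 0)).getD "")
    = (let products : List String := PySem.List.dedup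
        (data.flatMap (fun ventas => ((PySem.Dict.ofList ventas).keys).filter (fun p => p ≠ "day")))
       (PySem.List.max? products
        (fun p => data.foldl (fun s ventas => s + (PySem.Dict.ofList ventas).getD p 0) 0)).getD "") := by
  show (PySem.List.max? _ _).getD "" = (PySem.List.max? _ _).getD ""
  -- rewrite A's accumulation as a single fold over the flattened filtered items
  simp only [pv_foldl_if_filter]
  rw [show (data.foldl (fun acc ventas =>
        (((PySem.Dict.ofList ventas).items).filter (fun p => p.1 ≠ "day")).foldl
          (fun acc p => acc.modify p.1 0 (· + p.2)) acc) PySem.Dict.empty)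
      = ((data.flatMap (fun v => ((PySem.Dict.ofList v).items).filter (fun p => p.1 ≠ "day"))).foldl
          (fun acc p => acc.modify p.1 0 (· + p.2)) PySem.Dict.empty) from (List.foldl_flatMap).symm]
  have hkeys : ((data.flatMap (fun v => ((PySem.Dict.ofList v).items).filter (fun p => p.1 ≠ "day"))).foldl
          (fun acc p => acc.modify p.1 0 (· + p.2)) PySem.Dict.empty).keys
      = PySem.List.dedup
        (data.flatMap (fun ventas => ((PySem.Dict.ofList ventas).keys).filter (fun p => p ≠ "day"))) := by
    refine Eq.trans (PySem.Dict.keys_foldl_modify_key (β := String × Int) _ (fun p => p.1) 0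
      (fun _ p => (· + p.2)) PySem.Dict.empty) ?_
    rw [PySem.Dict.keys_empty, PySem.Set.update_nil_left, PySem.List.dedup_eq_ofList]
    rw [List.map_flatMap]
    congr 1
    exact List.flatMap_congr (fun v _ => pv_row_keys v)
  rw [hkeys]
  congr 1
  apply pv_max?_congr
  intro p hp
  -- p is a product name, in particular p ≠ "day"
  have hp' : p ≠ "day" := by
    rw [PySem.List.dedup_eq_ofList, PySem.Set.mem_ofList] at hp
    obtain ⟨v, _, hpv⟩ := List.mem_flatMap.mp hp
    exact (by simpa using (List.mem_filter.mp hpv).2)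
  rw [pv_getD_fold_modify, PySem.Dict.getD_empty]
  rw [List.filter_flatMap]
  rw [List.flatMap_congr (fun v _ => by rw [pv_row_filter v p hp'])]
  rw [List.map_flatMap, List.flatMap_def, List.sum_flatten, List.map_map]
  rw [PySem.List.foldl_add]
  simp only [Function.comp_def, zero_add]
  exact congrArg List.sum (List.map_congr_left (fun v _ => pv_row_sum v p))

theorem top_product_eq (data : List (List (String × Int))) :
    top_product data = top_product_alt data := by
  unfold top_product top_product_alt
  exact top_product_eq' data

-- ===== VERDICT (by name: the statement is the Claim_ definition above) =====
theorem top_product_spec : Claim_equal_top_product := by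
  intro data _ _
  exact top_product_eq data
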